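-- pv_equiv track=rewrite | github.com/minwl/leetcode | 0043-multiply-strings/0043-multiply-strings.py | convert
-- ===== SOURCE A (Python) =====
-- def convert(num):
--     ten = 1
--     i = len(num)-1
--     ans = 0
--     while i >= 0:
--         ans += (ord(num[i])-48)*ten
--         ten *= 10
--         i -= 1
--     return ans
-- ===== SOURCE B (Python) =====
-- def convert(num):
--     ans = 0
--     for c in num:
--         ans = ans * 10 + (ord(c) - 48)
--     return ans
-- ===== Notes on version B (the rewrite author's own statement) =====
-- stated objective: simpler
-- what changed: Replaces the reverse-index loop with an explicit power-of-ten accumulator by a left-to-right Horner fold ans = ans*10 + digit.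
import Mathlib
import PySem

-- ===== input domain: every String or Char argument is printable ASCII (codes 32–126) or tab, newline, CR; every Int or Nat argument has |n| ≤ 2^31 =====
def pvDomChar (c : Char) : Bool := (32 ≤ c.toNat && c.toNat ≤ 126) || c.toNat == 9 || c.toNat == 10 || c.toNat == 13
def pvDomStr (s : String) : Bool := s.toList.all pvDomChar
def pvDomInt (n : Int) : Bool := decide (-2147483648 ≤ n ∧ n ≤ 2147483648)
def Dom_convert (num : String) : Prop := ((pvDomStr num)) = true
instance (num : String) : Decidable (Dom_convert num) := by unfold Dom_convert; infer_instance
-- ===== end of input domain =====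

-- B replaces A's reverse-index loop with a power-of-ten accumulator by a left-to-right Horner fold (objective: simpler).

-- ===== PORT A =====
-- A walks indices from len-1 down to 0 keeping (ten, ans); ported as a recursion
-- over the reversed character list carrying the same (ten, ans) state.
def convertGo : List Char → Int → Int → Int
  | [], _, ans => ans
  | c :: rest, ten, ans => convertGo rest (ten * 10) (ans + ((c.toNat : Int) - 48) * ten)

def convert (num : String) : Int := convertGo num.toList.reverse 1 0

-- ===== PORT B =====
def convert_alt (num : String) : Int :=
  num.toList.foldl (fun ans c => ans * 10 + ((c.toNat : Int) - 48)) 0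

-- ===== PRECONDITION & SPEC =====
def Spec_convert (num : String) (out : Int) : Prop := out = convert_alt num
instance (num : String) (out : Int) : Decidable (Spec_convert num out) := by unfold Spec_convert; infer_instance

-- ===== CLAIM (what is proved, stated in full; the proofs are below) =====
def Claim_equal_convert : Prop := ∀ (num : String), Dom_convert num → Spec_convert num (convert num)

-- ===== LEMMAS AND PROOFS =====

-- little-endian digit value of a character list
def pvVal : List Char → Int
  | [] => 0
  | c :: rest => ((c.toNat : Int) - 48) + 10 * pvVal rest

theorem convertGo_eq_val (xs : List Char) : ∀ ten ans, convertGo xs ten ans = ans + ten * pvVal xs := by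
  induction xs with
  | nil => intro ten ans; simp [convertGo, pvVal]
  | cons c rest ih =>
    intro ten ans
    simp only [convertGo, pvVal, ih]
    ring

theorem pvVal_append (xs : List Char) (c : Char) :
    pvVal (xs ++ [c]) = pvVal xs + ((c.toNat : Int) - 48) * 10 ^ xs.length := by
  induction xs with
  | nil => simp [pvVal]
  | cons d rest ih => simp [pvVal, ih, List.length_cons]; ring

theorem foldl_horner (xs : List Char) : ∀ ans,
    xs.foldl (fun ans c => ans * 10 + ((c.toNat : Int) - 48)) ans
      = ans * 10 ^ xs.length + pvVal xs.reverse := by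
  induction xs with
  | nil => intro ans; simp [pvVal]
  | cons c rest ih =>
    intro ans
    simp only [List.foldl, ih, List.reverse_cons, pvVal_append, List.length_reverse,
      List.length_cons]
    ring

-- ===== VERDICT (by name: the statement is the Claim_ definition above) =====
theorem convert_spec : Claim_equal_convert := by
  intro num _
  unfold Spec_convert convert convert_alt
  rw [convertGo_eq_val, foldl_horner]
  simp
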